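-- pv_equiv track=rewrite | github.com/psi-oss/get-physics-done | src/gpd/adapters/install_utils.py | _strip_jsonc_trailing_commas
-- ===== SOURCE A (Python) =====
-- def _strip_jsonc_trailing_commas(content: str) -> str:
--     """Remove trailing commas before ``}``/``]`` without mutating string literals."""
--
--     result: list[str] = []
--     in_string = False
--     i = 0
--     length = len(content)
--
--     while i < length:
--         char = content[i]
--
--         if in_string:
--             result.append(char)
--             if char == "\\" and i + 1 < length:
--                 result.append(content[i + 1])
--                 i += 2
--                 continue
--             if char == '"':
--                 in_string = False
--             i += 1
--             continue
--
--         if char == '"':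
--             in_string = True
--             result.append(char)
--             i += 1
--             continue
--
--         if char in "}]":
--             scan = len(result) - 1
--             while scan >= 0 and result[scan].isspace():
--                 scan -= 1
--             if scan >= 0 and result[scan] == ",":
--                 del result[scan]
--
--         result.append(char)
--         i += 1
--
--     return "".join(result)
-- ===== SOURCE B (Python) =====
-- def _strip_jsonc_trailing_commas(content: str) -> str:
--     """Remove trailing commas before ``}``/``]`` without mutating string literals."""
--
--     out: list[str] = []
--     n = len(content)
--     i = 0
--     while i < n:
--         c = content[i]
--         if c == '"':
--             # copy a whole string literal (including escapes) untouched
--             j = i + 1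
--             while j < n:
--                 if content[j] == "\\" and j + 1 < n:
--                     j += 2
--                 elif content[j] == '"':
--                     j += 1
--                     break
--                 else:
--                     j += 1
--             out.append(content[i:j])
--             i = j
--         elif c == ",":
--             # forward lookahead: drop the comma iff the next non-space char closes
--             j = i + 1
--             while j < n and content[j].isspace():
--                 j += 1
--             if not (j < n and content[j] in "}]"):
--                 out.append(c)
--             i += 1
--         else:
--             out.append(c)
--             i += 1
--     return "".join(out)
-- ===== Notes on version B (the rewrite author's own statement) =====
-- stated objective: alternative
-- what changed: Replaces A's in-string state machine that builds a mutable result list and deletes trailing commas by scanning the result backwards at each }/], with a one-pass tokenizer that copies whole string literals untouched and decides at each comma, by forward lookahead over whitespace, whether to drop it.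
import Mathlib
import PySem

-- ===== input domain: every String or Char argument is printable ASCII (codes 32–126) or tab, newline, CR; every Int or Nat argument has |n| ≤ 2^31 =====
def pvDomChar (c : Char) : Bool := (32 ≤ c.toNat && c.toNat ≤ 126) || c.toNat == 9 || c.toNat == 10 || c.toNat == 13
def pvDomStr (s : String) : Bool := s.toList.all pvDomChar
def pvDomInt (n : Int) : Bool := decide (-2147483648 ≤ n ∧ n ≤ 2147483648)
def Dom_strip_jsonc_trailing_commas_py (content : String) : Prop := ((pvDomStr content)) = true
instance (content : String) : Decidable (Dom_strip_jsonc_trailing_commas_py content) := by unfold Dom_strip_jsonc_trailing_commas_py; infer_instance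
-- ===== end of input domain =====

-- B replaces A's in-string state machine with backward comma deletion by a tokenizer with
-- forward lookahead (objective: alternative — a genuinely different traversal; not claimed faster).

-- ===== PORT A =====
-- A's inner backscan: on the REVERSED result, skip whitespace, delete one ',' if found
def pvGoDel : List Char → List Char
  | [] => []
  | c :: t =>
    if PySem.Chars.isspace c then c :: pvGoDel t
    else if c == ',' then t
    else c :: t

-- A's `scan` loop plus `del result[scan]`, acting on the result list
def pvDelTrailing (res : List Char) : List Char := (pvGoDel res.reverse).reverse

-- A's main while-loop: remaining chars, in_string flag, result accumulator
def pvLoopA : List Char → Bool → List Char → List Char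
  | [], _, res => res
  | c :: rest, inStr, res =>
    if inStr then
      if c == '\\' then
        match rest with
        | d :: rest' => pvLoopA rest' true (res ++ [c, d])
        | [] => pvLoopA [] true (res ++ [c])
      else if c == '"' then pvLoopA rest false (res ++ [c])
      else pvLoopA rest true (res ++ [c])
    else if c == '"' then pvLoopA rest true (res ++ [c])
    else if c == '}' || c == ']' then pvLoopA rest false (pvDelTrailing res ++ [c])
    else pvLoopA rest false (res ++ [c])

def strip_jsonc_trailing_commas_py (content : String) : String :=
  String.ofList (pvLoopA content.toList false [])

-- ===== PORT B =====
-- B's inner string-literal loop: the literal's chars after the opening quote, and the rest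
def pvTakeStr : List Char → List Char × List Char
  | [] => ([], [])
  | c :: rest =>
    if c == '\\' then
      match rest with
      | d :: r' => let p := pvTakeStr r'; (c :: d :: p.1, p.2)
      | [] => ([c], [])
    else if c == '"' then ([c], rest)
    else let p := pvTakeStr rest; (c :: p.1, p.2)

-- termination measure for pvLoopB's string-literal case
theorem pvTakeStr_snd_length : ∀ cs : List Char, (pvTakeStr cs).2.length ≤ cs.length := by
  intro cs
  induction cs using pvTakeStr.induct with
  | case1 => simp [pvTakeStr]
  | case2 c hb d r' ih => rw [pvTakeStr.eq_def]; simp [hb]; omega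
  | case3 c hb => rw [pvTakeStr.eq_def]; simp [hb]
  | case4 c rest hb hq => rw [pvTakeStr.eq_def]; simp [hb, hq]
  | case5 c rest hb hq ih => rw [pvTakeStr.eq_def]; simp [hb, hq]; omega

-- B's main while-loop (the whitespace lookahead is rest.dropWhile isspace)
def pvLoopB : List Char → List Char
  | [] => []
  | c :: rest =>
    if c == '"' then
      c :: ((pvTakeStr rest).1 ++ pvLoopB (pvTakeStr rest).2)
    else if c == ',' then
      match rest.dropWhile PySem.Chars.isspace with
      | d :: _ => if d == '}' || d == ']' then pvLoopB rest else c :: pvLoopB rest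
      | [] => c :: pvLoopB rest
    else c :: pvLoopB rest
termination_by cs => cs.length
decreasing_by
  · exact Nat.lt_succ_of_le (pvTakeStr_snd_length rest)
  all_goals simp

def strip_jsonc_trailing_commas_py_alt (content : String) : String :=
  String.ofList (pvLoopB content.toList)

-- ===== PRECONDITION & SPEC =====
def Spec_strip_jsonc_trailing_commas_py (content : String) (out : String) : Prop := out = strip_jsonc_trailing_commas_py_alt content
instance (content : String) (out : String) : Decidable (Spec_strip_jsonc_trailing_commas_py content out) := by unfold Spec_strip_jsonc_trailing_commas_py; infer_instance

-- ===== CLAIM (what is proved, stated in full; the proofs are below) =====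
def Claim_equal_strip_jsonc_trailing_commas_py : Prop := ∀ (content : String), Dom_strip_jsonc_trailing_commas_py content → Spec_strip_jsonc_trailing_commas_py content (strip_jsonc_trailing_commas_py content)

-- ===== LEMMAS AND PROOFS =====

-- if the literal terminated, its last char is the closing quote
theorem pvTakeStr_ends_quote : ∀ cs : List Char, (pvTakeStr cs).2 ≠ [] →
    ∃ l, (pvTakeStr cs).1 = l ++ ['"'] := by
  intro cs
  induction cs using pvTakeStr.induct with
  | case1 => simp [pvTakeStr]
  | case2 c hb d r' ih =>
    intro h
    rw [pvTakeStr.eq_def] at h ⊢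
    simp only [hb, if_pos] at h ⊢
    obtain ⟨l, hl⟩ := ih h
    exact ⟨c :: d :: l, by simp [hl]⟩
  | case3 c hb =>
    rw [pvTakeStr.eq_def]; simp [hb]
  | case4 c rest hb hq =>
    intro _
    have hc : c = '"' := by simpa using hq
    rw [pvTakeStr.eq_def]
    simp [hc]
  | case5 c rest hb hq ih =>
    intro h
    rw [pvTakeStr.eq_def] at h ⊢
    simp only [hb, hq, if_neg, Bool.false_eq_true, not_false_iff] at h ⊢
    obtain ⟨l, hl⟩ := ih h
    exact ⟨c :: l, by simp [hl]⟩

-- step lemmas for the port of A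
theorem pvLoopA_nil (b : Bool) (res : List Char) : pvLoopA [] b res = res := by
  rw [pvLoopA.eq_def]

theorem pvLoopA_quote {c : Char} (hq : (c == '"') = true) (rest res : List Char) :
    pvLoopA (c :: rest) false res = pvLoopA rest true (res ++ [c]) := by
  rw [pvLoopA.eq_def]; simp [hq]

theorem pvLoopA_closer {c : Char} (hq : ¬(c == '"') = true) (hcl : (c == '}' || c == ']') = true)
    (rest res : List Char) :
    pvLoopA (c :: rest) false res = pvLoopA rest false (pvDelTrailing res ++ [c]) := by
  rw [pvLoopA.eq_def]; simp [hq, hcl]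

theorem pvLoopA_other {c : Char} (hq : ¬(c == '"') = true) (hcl : ¬(c == '}' || c == ']') = true)
    (rest res : List Char) :
    pvLoopA (c :: rest) false res = pvLoopA rest false (res ++ [c]) := by
  rw [pvLoopA.eq_def]; simp [hq, hcl]

theorem pvLoopA_str_esc {c : Char} (hb : (c == '\\') = true) (d : Char) (rest' res : List Char) :
    pvLoopA (c :: d :: rest') true res = pvLoopA rest' true (res ++ [c, d]) := by
  rw [pvLoopA.eq_def]; simp [hb]

theorem pvLoopA_str_esc_end {c : Char} (hb : (c == '\\') = true) (res : List Char) :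
    pvLoopA [c] true res = res ++ [c] := by
  rw [pvLoopA.eq_def]; simp [hb, pvLoopA_nil]

theorem pvLoopA_str_quote {c : Char} (hb : ¬(c == '\\') = true) (hq : (c == '"') = true)
    (rest res : List Char) :
    pvLoopA (c :: rest) true res = pvLoopA rest false (res ++ [c]) := by
  rw [pvLoopA.eq_def]; simp [hb, hq]

theorem pvLoopA_str_other {c : Char} (hb : ¬(c == '\\') = true) (hq : ¬(c == '"') = true)
    (rest res : List Char) :
    pvLoopA (c :: rest) true res = pvLoopA rest true (res ++ [c]) := by
  rw [pvLoopA.eq_def]; simp [hb, hq]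

-- A inside a string literal consumes exactly what B's pvTakeStr tokenizes
theorem pvLoopA_string : ∀ (cs res : List Char),
    pvLoopA cs true res = pvLoopA (pvTakeStr cs).2 false (res ++ (pvTakeStr cs).1) := by
  intro cs
  induction cs using pvTakeStr.induct with
  | case1 => intro res; rw [pvTakeStr.eq_def]; simp [pvLoopA_nil]
  | case2 c hb d r' ih =>
    intro res
    rw [pvLoopA_str_esc hb, pvTakeStr.eq_def]
    simp only [hb, if_pos]
    rw [ih]
    simp
  | case3 c hb =>
    intro res
    rw [pvLoopA_str_esc_end hb, pvTakeStr.eq_def]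
    simp [hb, pvLoopA_nil]
  | case4 c rest hb hq =>
    intro res
    rw [pvLoopA_str_quote hb hq, pvTakeStr.eq_def]
    simp [hb, hq]
  | case5 c rest hb hq ih =>
    intro res
    rw [pvLoopA_str_other hb hq, pvTakeStr.eq_def]
    simp only [hb, hq, if_neg, Bool.false_eq_true, not_false_iff]
    rw [ih]
    simp

-- how A's backscan acts on one appended char
theorem pvDelTrailing_ws {c : Char} (h : PySem.Chars.isspace c = true) (res : List Char) :
    pvDelTrailing (res ++ [c]) = pvDelTrailing res ++ [c] := by
  simp [pvDelTrailing, pvGoDel, h]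

theorem pvDelTrailing_comma (res : List Char) : pvDelTrailing (res ++ [',']) = res := by
  have h : PySem.Chars.isspace ',' = false := by decide
  simp [pvDelTrailing, pvGoDel, h]

theorem pvDelTrailing_other {c : Char} (h : PySem.Chars.isspace c = false) (h2 : ¬(c == ',') = true)
    (res : List Char) : pvDelTrailing (res ++ [c]) = res ++ [c] := by
  simp [pvDelTrailing, pvGoDel, h, h2]

-- does the upcoming input, after whitespace, start with a closer?
def pvSWC (cs : List Char) : Bool :=
  match cs.dropWhile PySem.Chars.isspace with
  | d :: _ => d == '}' || d == ']'
  | [] => false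

theorem pvSWC_nil : pvSWC [] = false := by simp [pvSWC]

theorem pvSWC_cons_ws {c : Char} (h : PySem.Chars.isspace c = true) (cs : List Char) :
    pvSWC (c :: cs) = pvSWC cs := by
  simp [pvSWC, List.dropWhile, h]

theorem pvSWC_cons_nonws {c : Char} (h : PySem.Chars.isspace c = false) (cs : List Char) :
    pvSWC (c :: cs) = (c == '}' || c == ']') := by
  simp [pvSWC, List.dropWhile, h]

-- step lemmas for the port of B
theorem pvLoopB_quote {c : Char} (hq : (c == '"') = true) (rest : List Char) :
    pvLoopB (c :: rest) = c :: ((pvTakeStr rest).1 ++ pvLoopB (pvTakeStr rest).2) := by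
  rw [pvLoopB.eq_def]; simp [hq]

theorem pvLoopB_comma {c : Char} (hq : ¬(c == '"') = true) (hc : (c == ',') = true)
    (rest : List Char) :
    pvLoopB (c :: rest) = if pvSWC rest then pvLoopB rest else c :: pvLoopB rest := by
  rw [pvLoopB.eq_def, pvSWC]
  cases hla : rest.dropWhile PySem.Chars.isspace with
  | nil => simp [hq, hc, hla]
  | cons d tl => by_cases hcl : (d == '}' || d == ']') = true <;> simp [hq, hc, hla, hcl]

theorem pvLoopB_other {c : Char} (hq : ¬(c == '"') = true) (hc : ¬(c == ',') = true)
    (rest : List Char) : pvLoopB (c :: rest) = c :: pvLoopB rest := by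
  rw [pvLoopB.eq_def]; simp [hq, hc]

-- closers are not whitespace
theorem pvCloser_nonws {c : Char} (hcl : (c == '}' || c == ']') = true) :
    PySem.Chars.isspace c = false := by
  rcases Bool.or_eq_true_iff.mp hcl with h | h
  · have hc : c = '}' := by simpa using h
    subst hc; decide
  · have hc : c = ']' := by simpa using h
    subst hc; decide

-- MAIN INVARIANT: A's run from any accumulated result equals that result — with its trailing
-- comma removed exactly when the upcoming input starts (after whitespace) with a closer —
-- followed by B's output for the remaining input.
theorem pvMain : ∀ (cs res : List Char),
    pvLoopA cs false res = (if pvSWC cs then pvDelTrailing res else res) ++ pvLoopB cs := by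
  intro cs
  induction cs using pvLoopB.induct with
  | case1 => intro res; simp [pvLoopA_nil, pvLoopB, pvSWC_nil]
  | case2 c rest hq ih =>
    -- string literal
    intro res
    have hc : c = '"' := by simpa using hq
    have hws : PySem.Chars.isspace c = false := by subst hc; decide
    rw [pvSWC_cons_nonws hws, pvLoopA_quote hq, pvLoopA_string, ih, pvLoopB_quote hq]
    have hne : (c == '}' || c == ']') = false := by subst hc; decide
    rw [hne]
    by_cases hemp : (pvTakeStr rest).2 = []
    · simp [hemp, pvSWC_nil]
    · obtain ⟨l, hl⟩ := pvTakeStr_ends_quote rest hemp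
      have hdel : pvDelTrailing (res ++ c :: (pvTakeStr rest).1)
          = res ++ c :: (pvTakeStr rest).1 := by
        rw [hl]
        have hsplit : res ++ c :: (l ++ ['"']) = (res ++ c :: l) ++ ['"'] := by simp
        rw [hsplit, pvDelTrailing_other (by decide) (by decide)]
      by_cases h : pvSWC (pvTakeStr rest).2 = true <;> simp [h, hdel]
  | case3 c rest hq hc d tl hla hcl ih =>
    -- comma dropped: the next non-space char closes
    intro res
    have hcomma : c = ',' := by simpa using hc
    have hws : PySem.Chars.isspace c = false := by subst hcomma; decide
    have hne : (c == '}' || c == ']') = false := by subst hcomma; decide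
    have hswr : pvSWC rest = true := by simp [pvSWC, hla, hcl]
    rw [pvSWC_cons_nonws hws, hne, pvLoopA_other hq (by simp [hne]), ih, hswr,
      pvLoopB_comma hq hc, hswr]
    subst hcomma
    simp [pvDelTrailing_comma]
  | case4 c rest hq hc d tl hla hcl ih =>
    -- comma kept: the next non-space char does not close
    intro res
    have hcomma : c = ',' := by simpa using hc
    have hws : PySem.Chars.isspace c = false := by subst hcomma; decide
    have hne : (c == '}' || c == ']') = false := by subst hcomma; decide
    have hswr : pvSWC rest = false := by simp [pvSWC, hla, hcl]
    rw [pvSWC_cons_nonws hws, hne, pvLoopA_other hq (by simp [hne]), ih, hswr,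
      pvLoopB_comma hq hc, hswr]
    simp
  | case5 c rest hq hc hla ih =>
    -- comma kept: only whitespace remains
    intro res
    have hcomma : c = ',' := by simpa using hc
    have hws : PySem.Chars.isspace c = false := by subst hcomma; decide
    have hne : (c == '}' || c == ']') = false := by subst hcomma; decide
    have hswr : pvSWC rest = false := by simp [pvSWC, hla]
    rw [pvSWC_cons_nonws hws, hne, pvLoopA_other hq (by simp [hne]), ih, hswr,
      pvLoopB_comma hq hc, hswr]
    simp
  | case6 c rest hq hc ih =>
    -- every other character
    intro res
    by_cases hcl : (c == '}' || c == ']') = true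
    · -- a closer: A deletes the pending trailing comma here
      have hws := pvCloser_nonws hcl
      rw [pvSWC_cons_nonws hws, hcl, pvLoopA_closer hq hcl, ih, pvLoopB_other hq hc]
      by_cases h : pvSWC rest = true <;>
        simp [h, pvDelTrailing_other hws hc]
    · by_cases hws : PySem.Chars.isspace c = true
      · rw [pvSWC_cons_ws hws, pvLoopA_other hq hcl, ih, pvLoopB_other hq hc]
        by_cases h : pvSWC rest = true <;> simp [h, pvDelTrailing_ws hws]
      · have hws' : PySem.Chars.isspace c = false := by simpa using hws
        rw [pvSWC_cons_nonws hws', pvLoopA_other hq hcl, ih, pvLoopB_other hq hc]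
        have hne : (c == '}' || c == ']') = false := by simpa using hcl
        rw [hne]
        by_cases h : pvSWC rest = true <;> simp [h, pvDelTrailing_other hws' hc]

-- ===== VERDICT (by name: the statement is the Claim_ definition above) =====
theorem strip_jsonc_trailing_commas_py_spec : Claim_equal_strip_jsonc_trailing_commas_py := by
  intro content _
  unfold Spec_strip_jsonc_trailing_commas_py strip_jsonc_trailing_commas_py strip_jsonc_trailing_commas_py_alt
  rw [pvMain]
  by_cases h : pvSWC content.toList = true <;> simp [h, pvDelTrailing, pvGoDel]
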